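-- pv_equiv track=rewrite | github.com/joaopedroaraujoinacio/Paradigmas_de_Linguagens_de_Programacao | diretorio2/funcoes.py | maiorMenorVetor
-- ===== SOURCE A (Python) =====
-- def maiorMenorVetor(vetor):
--     maior = vetor[0]
--     menor = vetor[0]
--
--     for i in range(1, len(vetor)):
--         if vetor[i] > maior:
--             maior = vetor[i]
--         elif vetor[i] < menor:
--             menor = vetor[i]
--
--     return maior, menor
-- ===== SOURCE B (Python) =====
-- def maiorMenorVetor(vetor):
--     s = sorted(vetor)
--     return s[-1], s[0]
-- ===== Notes on version B (the rewrite author's own statement) =====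
-- stated objective: simpler
-- what changed: Replaces the explicit index loop that tracks running max/min with a single sort followed by indexing the last and first elements.
import Mathlib
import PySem

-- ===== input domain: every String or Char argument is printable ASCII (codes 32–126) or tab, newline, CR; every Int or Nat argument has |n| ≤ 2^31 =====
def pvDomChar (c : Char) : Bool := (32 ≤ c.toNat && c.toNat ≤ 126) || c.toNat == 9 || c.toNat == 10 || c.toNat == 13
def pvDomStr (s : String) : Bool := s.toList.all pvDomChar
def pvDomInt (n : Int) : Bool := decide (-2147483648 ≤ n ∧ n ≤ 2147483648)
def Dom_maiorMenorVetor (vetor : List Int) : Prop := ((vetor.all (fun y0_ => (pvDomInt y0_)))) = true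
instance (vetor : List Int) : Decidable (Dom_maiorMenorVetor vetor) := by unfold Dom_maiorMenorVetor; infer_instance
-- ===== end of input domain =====

-- B replaces A's index loop with running max/min by a sort followed by taking the last and
-- first elements (objective: simpler); same return value on every non-empty list.

-- ===== PORT A =====
-- A: maior = menor = vetor[0]; loop i in range(1, len): update maior / elif update menor.
def maiorMenorVetor (vetor : List Int) : Int × Int :=
  let m0 := PySem.List.pyGetD vetor 0 0   -- vetor[0]; IndexError on [] is excluded by Pre_
  (PySem.List.pyRange 1 (vetor.length : Int) 1).foldl
    (fun (s : Int × Int) i =>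
      let x := PySem.List.pyGetD vetor i 0   -- vetor[i], i always in range
      if x > s.1 then (x, s.2)
      else if x < s.2 then (s.1, x)
      else s)
    (m0, m0)

-- ===== PORT B =====
-- B: s = sorted(vetor); return s[-1], s[0]
def maiorMenorVetor_alt (vetor : List Int) : Int × Int :=
  let s := PySem.List.sorted vetor (fun x => x) false
  (PySem.List.pyGetD s (-1) 0, PySem.List.pyGetD s 0 0)

-- ===== PRECONDITION & SPEC =====
-- A raises IndexError on the empty list (vetor[0]); B raises there too (s[-1]).
def Pre_maiorMenorVetor (vetor : List Int) : Prop := vetor ≠ []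
instance (vetor : List Int) : Decidable (Pre_maiorMenorVetor vetor) := by unfold Pre_maiorMenorVetor; infer_instance
def pvWitness_maiorMenorVetor : List Int := [3, -1, 7]

def Spec_maiorMenorVetor (vetor : List Int) (out : Int × Int) : Prop := out = maiorMenorVetor_alt vetor
instance (vetor : List Int) (out : Int × Int) : Decidable (Spec_maiorMenorVetor vetor out) := by unfold Spec_maiorMenorVetor; infer_instance

-- ===== CLAIM (what is proved, stated in full; the proofs are below) =====
def Claim_equal_maiorMenorVetor : Prop := ∀ (vetor : List Int), Dom_maiorMenorVetor vetor → Pre_maiorMenorVetor vetor → Spec_maiorMenorVetor vetor (maiorMenorVetor vetor)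

-- ===== LEMMAS AND PROOFS =====

-- A's loop body, abstracted over the current element.
def pvStep (s : Int × Int) (x : Int) : Int × Int :=
  if x > s.1 then (x, s.2) else if x < s.2 then (s.1, x) else s

-- The loop computes (foldl max, foldl min) as long as min ≤ max.
theorem pvLoop_eq (rest : List Int) : ∀ a b : Int, b ≤ a →
    rest.foldl pvStep (a, b) = (rest.foldl max a, rest.foldl min b) := by
  induction rest with
  | nil => intro a b _; rfl
  | cons x t ih =>
    intro a b hba
    simp only [List.foldl_cons, pvStep]
    by_cases h1 : x > a
    · simp only [if_pos h1]
      rw [ih x b (le_of_lt (lt_of_le_of_lt hba h1)),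
          max_eq_right (le_of_lt h1), min_eq_left (le_trans hba (le_of_lt h1))]
    · simp only [if_neg h1]
      by_cases h2 : x < b
      · simp only [if_pos h2]
        rw [ih a x (le_of_not_gt h1), max_eq_left (le_of_not_gt h1),
            min_eq_right (le_of_lt h2)]
      · rw [if_neg h2, ih a b hba, max_eq_left (le_of_not_gt h1),
            min_eq_left (le_of_not_gt h2)]

theorem pvFoldl_max_mem (rest : List Int) : ∀ a : Int, rest.foldl max a ∈ a :: rest := by
  induction rest with
  | nil => intro a; simp
  | cons x t ih =>
    intro a
    have h0 := ih (max a x)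
    simp only [List.foldl_cons]
    rcases List.mem_cons.mp h0 with h | h
    · rw [h]; rcases max_choice a x with hc | hc <;> rw [hc] <;> simp
    · simp [h]

theorem pvLe_foldl_max (rest : List Int) : ∀ a : Int,
    a ≤ rest.foldl max a ∧ ∀ y ∈ rest, y ≤ rest.foldl max a := by
  induction rest with
  | nil => intro a; simp
  | cons x t ih =>
    intro a
    obtain ⟨h1, h2⟩ := ih (max a x)
    refine ⟨le_trans (le_max_left a x) h1, ?_⟩
    intro y hy
    rcases List.mem_cons.mp hy with rfl | hy
    · exact le_trans (le_max_right a y) h1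
    · exact h2 y hy

theorem pvFoldl_min_mem (rest : List Int) : ∀ a : Int, rest.foldl min a ∈ a :: rest := by
  induction rest with
  | nil => intro a; simp
  | cons x t ih =>
    intro a
    have h0 := ih (min a x)
    simp only [List.foldl_cons]
    rcases List.mem_cons.mp h0 with h | h
    · rw [h]; rcases min_choice a x with hc | hc <;> rw [hc] <;> simp
    · simp [h]

theorem pvFoldl_min_le (rest : List Int) : ∀ a : Int,
    rest.foldl min a ≤ a ∧ ∀ y ∈ rest, rest.foldl min a ≤ y := by
  induction rest with
  | nil => intro a; simp
  | cons x t ih =>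
    intro a
    obtain ⟨h1, h2⟩ := ih (min a x)
    refine ⟨le_trans h1 (min_le_left a x), ?_⟩
    intro y hy
    rcases List.mem_cons.mp hy with rfl | hy
    · exact le_trans h1 (min_le_right a y)
    · exact h2 y hy

-- Last element of a (≤)-pairwise-sorted list bounds every element from above.
theorem pvPairwise_le_getLast (ys : List Int) (h : ys.Pairwise (· ≤ ·)) (hne : ys ≠ []) :
    ∀ y ∈ ys, y ≤ ys.getLast hne := by
  induction ys with
  | nil => exact absurd rfl hne
  | cons x t ih =>
    intro y hy
    rcases List.mem_cons.mp hy with rfl | hy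
    · cases t with
      | nil => simp [List.getLast]
      | cons z u =>
        have hxlast : y ≤ (z :: u).getLast (by simp) := by
          have hall := (List.pairwise_cons.mp h).1
          exact hall _ (List.getLast_mem _)
        simpa [List.getLast_cons] using hxlast
    · cases t with
      | nil => simp at hy
      | cons z u =>
        have := ih (List.pairwise_cons.mp h).2 (by simp) y hy
        simpa [List.getLast_cons] using this

theorem maiorMenorVetor_eq (vetor : List Int) (hne : vetor ≠ []) :
    maiorMenorVetor vetor = maiorMenorVetor_alt vetor := by
  obtain ⟨v0, rest, rfl⟩ := List.exists_cons_of_ne_nil hne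
  -- evaluate A's loop
  have hA : maiorMenorVetor (v0 :: rest) = (rest.foldl max v0, rest.foldl min v0) := by
    simp only [maiorMenorVetor, PySem.List.pyGetD_zero_cons]
    show (PySem.List.pyRange 1 ((v0 :: rest).length : Int) 1).foldl
        (fun acc j => pvStep acc (PySem.List.pyGetD (v0 :: rest) j 0)) (v0, v0) = _
    rw [PySem.List.foldl_pyRange_pyGetD' (v0 :: rest) 0 pvStep (v0, v0) (a := 1) (by norm_num)]
    simpa using pvLoop_eq rest v0 v0 le_rfl
  -- evaluate B's sort-and-index
  have hsne : PySem.List.sorted (v0 :: rest) (fun x => x) false ≠ [] := by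
    simp [PySem.List.sorted_eq_nil_iff]
  obtain ⟨m, t, hmt⟩ := List.exists_cons_of_ne_nil hsne
  have hperm : (m :: t).Perm (v0 :: rest) := hmt ▸ PySem.List.sorted_perm ..
  have hpw : (m :: t).Pairwise (· ≤ ·) := by
    have h := PySem.List.sorted_pairwise (v0 :: rest) (fun x => x)
    rw [hmt] at h; exact h
  have hheadle : ∀ y ∈ v0 :: rest, m ≤ y := fun y hy =>
    PySem.List.key_head_sorted_le (v0 :: rest) (fun x => x) hmt y hy
  have hB : maiorMenorVetor_alt (v0 :: rest) = ((m :: t).getLast (by simp), m) := by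
    simp only [maiorMenorVetor_alt]
    rw [hmt, PySem.List.pyGetD_neg_one (m :: t) 0 (by simp), PySem.List.pyGetD_zero_cons]
  rw [hA, hB]
  -- max component
  have hmaxmem : rest.foldl max v0 ∈ v0 :: rest := pvFoldl_max_mem rest v0
  have hlastmem : (m :: t).getLast (by simp) ∈ v0 :: rest :=
    hperm.mem_iff.mp (List.getLast_mem (by simp))
  have h1 : rest.foldl max v0 ≤ (m :: t).getLast (by simp) :=
    pvPairwise_le_getLast (m :: t) hpw (by simp) _ (hperm.mem_iff.mpr hmaxmem)
  have h2 : (m :: t).getLast (by simp) ≤ rest.foldl max v0 := by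
    obtain ⟨ha, hall⟩ := pvLe_foldl_max rest v0
    rcases List.mem_cons.mp hlastmem with h | h
    · rw [h]; exact ha
    · exact hall _ h
  -- min component
  have hminmem : rest.foldl min v0 ∈ v0 :: rest := pvFoldl_min_mem rest v0
  have hmmem : m ∈ v0 :: rest := hperm.mem_iff.mp (by simp)
  have h3 : m ≤ rest.foldl min v0 := hheadle _ hminmem
  have h4 : rest.foldl min v0 ≤ m := by
    obtain ⟨ha, hall⟩ := pvFoldl_min_le rest v0
    rcases List.mem_cons.mp hmmem with h | h
    · rw [h]; exact ha
    · exact hall _ h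
  exact Prod.ext (le_antisymm h1 h2) (le_antisymm h4 h3)

-- ===== VERDICT (by name: the statement is the Claim_ definition above) =====
theorem maiorMenorVetor_spec : Claim_equal_maiorMenorVetor := by
  intro vetor _ hpre
  exact maiorMenorVetor_eq vetor hpre
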